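-- pv_equiv track=rewrite | github.com/ebehlmann/puzzling | python/advent_of_code/2021/day_8/day_8.py | map_digits
-- ===== SOURCE A (Python) =====
-- def decode_digit(digit, signal_map):
-- 	result = []
-- 	for i in digit:
-- 		result.append(signal_map[i])
-- 	return result
--
-- def map_digits(signal_pattern, signal_map, segment_lookup):
-- 	result = {}
-- 	for digit in signal_pattern:
-- 		decoded = decode_digit(digit, signal_map)
-- 		for k, v in segment_lookup.items():
-- 			if set(decoded) == set(v):
-- 				result[''.join(sorted(digit))] = k
-- 				break
-- 	return result
-- ===== SOURCE B (Python) =====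
-- def map_digits(signal_pattern, signal_map, segment_lookup):
-- 	# Build a reverse index frozenset(segments) -> digit once (first key wins,
-- 	# matching the original inner loop's break), then decode each pattern with
-- 	# one O(1) lookup instead of scanning segment_lookup per pattern.
-- 	index = {}
-- 	for k, v in segment_lookup.items():
-- 		index.setdefault(frozenset(v), k)
-- 	result = {}
-- 	for digit in signal_pattern:
-- 		decoded = frozenset(signal_map[i] for i in digit)
-- 		if decoded in index:
-- 			result[''.join(sorted(digit))] = index[decoded]
-- 	return result
-- ===== Notes on version B (the rewrite author's own statement) =====
-- stated objective: faster
-- what changed: Replaces the per-pattern linear scan of segment_lookup by a reverse index frozenset(segments)->digit built once with setdefault (first key wins, matching the original break), so each pattern is decoded with one hash lookup.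
import Mathlib
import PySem

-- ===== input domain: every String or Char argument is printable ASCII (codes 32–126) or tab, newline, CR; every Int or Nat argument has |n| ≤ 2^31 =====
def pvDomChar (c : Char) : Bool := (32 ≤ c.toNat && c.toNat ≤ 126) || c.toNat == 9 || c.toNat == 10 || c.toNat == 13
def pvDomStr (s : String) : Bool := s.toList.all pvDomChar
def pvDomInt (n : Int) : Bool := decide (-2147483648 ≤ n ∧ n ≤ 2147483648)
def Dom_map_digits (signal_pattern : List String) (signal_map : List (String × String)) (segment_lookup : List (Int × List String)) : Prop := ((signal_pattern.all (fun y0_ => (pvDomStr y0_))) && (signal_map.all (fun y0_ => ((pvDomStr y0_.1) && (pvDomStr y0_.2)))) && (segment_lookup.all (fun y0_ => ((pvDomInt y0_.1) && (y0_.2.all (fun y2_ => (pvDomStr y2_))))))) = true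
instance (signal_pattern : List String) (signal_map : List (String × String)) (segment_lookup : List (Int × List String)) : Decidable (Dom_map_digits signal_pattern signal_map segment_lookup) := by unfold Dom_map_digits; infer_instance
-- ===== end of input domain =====

-- B replaces A's per-pattern linear scan of segment_lookup by a reverse index built once (first key wins), one hash lookup per pattern (objective: faster).

-- ===== PORT A =====
-- shared by both ports: decode_digit(digit, signal_map); 'none' = KeyError (a char of digit not a key of signal_map; excluded by Pre_)
def decodeDigit (digit : String) (signal_map : List (String × String)) : Option (List String) :=
  digit.toList.foldl (fun acc i =>
    match acc with
    | none => none
    | some r =>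
      match (PySem.Dict.ofList signal_map).get? (String.ofList [i]) with
      | none => none
      | some v => some (r ++ [v])) (some [])

-- ''.join(sorted(digit)): sorting digit's 1-char strings = sorting its chars by code point (exact: Python compares 1-char strings by code point)
def sortedKey (digit : String) : String := String.ofList (PySem.List.sorted digit.toList (fun x => x) false)

-- A's inner 'for k, v in segment_lookup.items(): if set(decoded) == set(v): result[...] = k; break'
def scanLookup (decoded : List String) (key : String) : List (Int × List String) → PySem.Dict String Int → PySem.Dict String Int
  | [], result => result
  | (k, v) :: rest, result =>
    if PySem.Set.equal (PySem.Set.ofList decoded) (PySem.Set.ofList v) then result.insert key k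
    else scanLookup decoded key rest result

def map_digits (signal_pattern : List String) (signal_map : List (String × String)) (segment_lookup : List (Int × List String)) : List (String × Int) :=
  (signal_pattern.foldl (fun result digit =>
    match decodeDigit digit signal_map with
    | none => result
    | some decoded => scanLookup decoded (sortedKey digit) (PySem.Dict.ofList segment_lookup).items result)
   PySem.Dict.empty).items

-- ===== PORT B =====
-- frozenset(v) is represented by its canonical element list (strictly sorted, distinct): frozenset equality = set equality = equality of canonKey (exact)
def canonKey (v : List String) : List String :=
  PySem.List.sorted (PySem.Set.ofList v) (fun x => x) false

def map_digits_alt (signal_pattern : List String) (signal_map : List (String × String)) (segment_lookup : List (Int × List String)) : List (String × Int) :=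
  let index := (PySem.Dict.ofList segment_lookup).items.foldl
    (fun d kv => d.setdefault (canonKey kv.2) kv.1) PySem.Dict.empty
  (signal_pattern.foldl (fun result digit =>
    match decodeDigit digit signal_map with
    | none => result
    | some decoded =>
      match index.get? (canonKey decoded) with
      | none => result
      | some k => result.insert (sortedKey digit) k)
   PySem.Dict.empty).items

-- ===== PRECONDITION & SPEC =====
-- Pre_ excludes exactly the inputs where A raises KeyError: some char of some pattern is not a key of signal_map.
def Pre_map_digits (signal_pattern : List String) (signal_map : List (String × String)) (segment_lookup : List (Int × List String)) : Prop :=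
  (signal_pattern.all (fun digit => digit.toList.all (fun c => (PySem.Dict.ofList signal_map).contains (String.ofList [c])))) = true
instance (signal_pattern : List String) (signal_map : List (String × String)) (segment_lookup : List (Int × List String)) : Decidable (Pre_map_digits signal_pattern signal_map segment_lookup) := by unfold Pre_map_digits; infer_instance
def pvWitness_map_digits : List String × (List (String × String)) × (List (Int × List String)) :=
  (["ab", "b"], [("a", "x"), ("b", "y")], [(1, ["x", "y"]), (7, ["y"])])

def Spec_map_digits (signal_pattern : List String) (signal_map : List (String × String)) (segment_lookup : List (Int × List String)) (out : List (String × Int)) : Prop := out = map_digits_alt signal_pattern signal_map segment_lookup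
instance (signal_pattern : List String) (signal_map : List (String × String)) (segment_lookup : List (Int × List String)) (out : List (String × Int)) : Decidable (Spec_map_digits signal_pattern signal_map segment_lookup out) := by unfold Spec_map_digits; infer_instance

-- ===== CLAIM (what is proved, stated in full; the proofs are below) =====
def Claim_equal_map_digits : Prop := ∀ (signal_pattern : List String) (signal_map : List (String × String)) (segment_lookup : List (Int × List String)), Dom_map_digits signal_pattern signal_map segment_lookup → Pre_map_digits signal_pattern signal_map segment_lookup → Spec_map_digits signal_pattern signal_map segment_lookup (map_digits signal_pattern signal_map segment_lookup)

-- ===== LEMMAS AND PROOFS =====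

-- set(d) == set(v)  ↔  their canonical sorted element lists coincide
theorem canon_eq (d v : List String) :
    PySem.Set.equal (PySem.Set.ofList d) (PySem.Set.ofList v) = (canonKey v == canonKey d) := by
  rw [Bool.eq_iff_iff]
  rw [PySem.Set.equal_iff, beq_iff_eq]
  unfold canonKey
  rw [PySem.List.sorted_id_eq_sorted_id_iff_perm,
      List.perm_ext_iff_of_nodup (PySem.Set.nodup_ofList _) (PySem.Set.nodup_ofList _)]
  exact ⟨fun h x => (h x).symm, fun h x => (h x).symm⟩

-- get? of the index built by setdefault = first match in the items list
theorem get?_index (items : List (Int × List String)) (d0 : PySem.Dict (List String) Int) (key : List String) :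
    (items.foldl (fun d kv => d.setdefault (canonKey kv.2) kv.1) d0).get? key =
      (d0.get? key).or ((items.find? (fun kv => canonKey kv.2 == key)).map (·.1)) := by
  induction items generalizing d0 with
  | nil => simp
  | cons kv rest ih =>
    obtain ⟨k, v⟩ := kv
    simp only [List.foldl_cons, List.find?]
    rw [ih]
    by_cases hck : canonKey v = key
    · subst hck
      simp [PySem.Dict.get?_setdefault_self]
    · have hb : (canonKey v == key) = false := by simp [hck]
      rw [hb]
      rw [PySem.Dict.get?_setdefault_of_ne (hne := fun h => hck h.symm)]

-- A's break-scan equals B's one index lookup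
theorem scan_eq (items : List (Int × List String)) (decoded : List String) (key : String) (result : PySem.Dict String Int) :
    scanLookup decoded key items result =
      match (items.foldl (fun d kv => d.setdefault (canonKey kv.2) kv.1) PySem.Dict.empty).get? (canonKey decoded) with
      | none => result
      | some k => result.insert key k := by
  rw [get?_index]
  induction items with
  | nil => rfl
  | cons kv rest ih =>
    obtain ⟨k, v⟩ := kv
    simp only [scanLookup, List.find?]
    rw [canon_eq decoded v]
    cases (canonKey v == canonKey decoded) with
    | true => simp
    | false => simp only [Bool.false_eq_true, if_false]; rw [ih]

-- ===== VERDICT (by name: the statement is the Claim_ definition above) =====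
theorem map_digits_spec : Claim_equal_map_digits := by
  intro sp sm sl _ _
  unfold Spec_map_digits map_digits map_digits_alt
  congr 1
  refine PySem.List.foldl_congr_mem _ _ _ _ ?_
  intro result digit _
  cases hd : decodeDigit digit sm with
  | none => rfl
  | some decoded => exact scan_eq _ _ _ _
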